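-- pv_equiv track=rewrite | github.com/SEOYUN5/homework2025 | pythonbasic.py | calculate_dish_height
-- ===== SOURCE A (Python) =====
-- def calculate_dish_height(shapes):
--     """그릇의 모양에 따라 높이를 계산합니다. (첫 그릇 10, 같은 방향 +5, 다른 방향 +10)"""
--     if not shapes:
--         return 0
--
--     height = 10
--     for i in range(1, len(shapes)):
--         if shapes[i] == shapes[i-1]:
--             height += 5
--         else:
--             height += 10
--     return height
-- ===== SOURCE B (Python) =====
-- def calculate_dish_height(shapes):
--     """그릇의 모양에 따라 높이를 계산합니다. (첫 그릇 10, 같은 방향 +5, 다른 방향 +10)"""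
--     if not shapes:
--         return 0
--     # Count maximal runs of equal consecutive shapes by skipping each run,
--     # then use the identity: height = 5 * (len(shapes) + number_of_runs).
--     n = len(shapes)
--     runs = 0
--     i = 0
--     while i < n:
--         runs += 1
--         j = i + 1
--         while j < n and shapes[j] == shapes[i]:
--             j += 1
--         i = j
--     return 5 * (n + runs)
-- ===== Notes on version B (the rewrite author's own statement) =====
-- stated objective: alternative
-- what changed: B traverses the list run by run (an outer loop that skips each maximal run of equal shapes with an inner skip loop) and returns 5*(n + runs), instead of A's per-element +5/+10 accumulation.
import Mathlib
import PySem

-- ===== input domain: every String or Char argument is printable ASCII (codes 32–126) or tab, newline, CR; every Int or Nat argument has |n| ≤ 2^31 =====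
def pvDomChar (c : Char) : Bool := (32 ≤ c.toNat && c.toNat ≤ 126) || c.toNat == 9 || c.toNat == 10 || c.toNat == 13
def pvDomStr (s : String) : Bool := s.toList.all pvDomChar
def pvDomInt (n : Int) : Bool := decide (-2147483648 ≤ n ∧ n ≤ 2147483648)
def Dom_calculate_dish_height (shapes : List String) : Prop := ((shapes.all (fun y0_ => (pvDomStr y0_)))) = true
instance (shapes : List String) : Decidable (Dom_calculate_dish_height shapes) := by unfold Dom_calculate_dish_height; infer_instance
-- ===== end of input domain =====

-- B traverses the list run by run (skipping each maximal run of equal shapes)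
-- and returns 5*(n + runs), instead of A's per-element +5/+10 accumulation (alternative, same cost).

-- ===== PORT A =====
-- loop: for i in range(1, len(shapes)): compare shapes[i] with shapes[i-1]
def calculate_dish_height (shapes : List String) : Int :=
  if shapes = [] then 0
  else
    (PySem.List.pyRange 1 (shapes.length : Int) 1).foldl
      (fun h i =>
        if PySem.List.pyGetD shapes i "" = PySem.List.pyGetD shapes (i - 1) "" then h + 5
        else h + 10) 10

-- ===== PORT B =====
-- outer while loop = recursion on the remaining suffix; inner while loop that
-- advances j past elements equal to the run head = dropWhile
def pvRuns : List String → Int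
  | [] => 0
  | x :: t => 1 + pvRuns (t.dropWhile (fun y => y == x))
termination_by xs => xs.length
decreasing_by
  have := List.length_dropWhile_le (fun y => y == x) t
  simp only [List.length_cons]
  omega

def calculate_dish_height_alt (shapes : List String) : Int :=
  if shapes = [] then 0
  else 5 * ((shapes.length : Int) + pvRuns shapes)

-- ===== PRECONDITION & SPEC =====
def Spec_calculate_dish_height (shapes : List String) (out : Int) : Prop := out = calculate_dish_height_alt shapes
instance (shapes : List String) (out : Int) : Decidable (Spec_calculate_dish_height shapes out) := by unfold Spec_calculate_dish_height; infer_instance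

-- ===== CLAIM (what is proved, stated in full; the proofs are below) =====
def Claim_equal_calculate_dish_height : Prop := ∀ (shapes : List String), Dom_calculate_dish_height shapes → Spec_calculate_dish_height shapes (calculate_dish_height shapes)

-- ===== LEMMAS AND PROOFS =====

-- count of adjacent differing pairs: the quantity A's loop effectively accumulates
def pvDcount (xs : List String) : Int :=
  (((xs.zip (xs.drop 1)).filter (fun p => p.1 != p.2)).length : Int)

theorem pvDcount_nil : pvDcount [] = 0 := rfl

theorem pvDcount_single (a : String) : pvDcount [a] = 0 := rfl

theorem pvDcount_cons_cons (a b : String) (t : List String) :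
    pvDcount (a :: b :: t) = (if a = b then 0 else 1) + pvDcount (b :: t) := by
  simp only [pvDcount, List.drop_succ_cons, List.drop_zero, List.zip_cons_cons,
    List.filter_cons]
  by_cases h : a = b
  · simp [h]
  · simp [h, bne_iff_ne]
    ring

-- number of runs = adjacent differing pairs + 1 (on a nonempty list)
theorem pvRuns_eq_dcount : ∀ (t : List String) (x : String),
    pvRuns (x :: t) = pvDcount (x :: t) + 1 := by
  intro t
  induction t with
  | nil => intro x; simp [pvRuns, pvDcount]
  | cons y t' ih =>
    intro x
    by_cases h : y = x
    · subst h
      rw [pvDcount_cons_cons, if_pos rfl]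
      have h1 : pvRuns (y :: y :: t') = pvRuns (y :: t') := by
        rw [pvRuns, pvRuns]
        simp
      rw [h1, ih y]
      ring
    · rw [pvDcount_cons_cons, if_neg (fun he => h he.symm)]
      have h1 : pvRuns (x :: y :: t') = 1 + pvRuns (y :: t') := by
        rw [pvRuns]
        have : (y :: t').dropWhile (fun z => z == x) = y :: t' := by
          rw [List.dropWhile_cons_of_neg]
          simp [h]
        rw [this]
      rw [h1, ih y]
      ring

-- A's loop computes 10 + 5*(n-k) + 5*dcount(drop (k-1))
theorem pv_fold_eq (shapes : List String) :
    ∀ (m k : Nat) (acc : Int), shapes.length - k = m → 1 ≤ k → k ≤ shapes.length →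
    (PySem.List.pyRange (k : Int) (shapes.length : Int) 1).foldl
      (fun h i =>
        if PySem.List.pyGetD shapes i "" = PySem.List.pyGetD shapes (i - 1) "" then h + 5
        else h + 10) acc
    = acc + 5 * ((shapes.length : Int) - k) + 5 * pvDcount (shapes.drop (k - 1)) := by
  intro m
  induction m with
  | zero =>
    intro k acc hm hk hkn
    have hk' : (k : Int) = (shapes.length : Int) := by exact_mod_cast (by omega : k = shapes.length)
    rw [hk', show PySem.List.pyRange (shapes.length : Int) (shapes.length : Int) 1 = [] from by
      simp [pysem]]
    have hz : pvDcount (shapes.drop (k - 1)) = 0 := by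
      have hlen : (shapes.drop (k - 1)).length ≤ 1 := by
        simp [List.length_drop]; omega
      match hsd : shapes.drop (k - 1) with
      | [] => exact pvDcount_nil
      | [a] => exact pvDcount_single a
      | a :: b :: t => rw [hsd] at hlen; simp at hlen
    rw [hz]
    simp
  | succ m ih =>
    intro k acc hm hk hkn
    have hlt : k < shapes.length := by omega
    rw [PySem.List.pyRange_one_cons (by exact_mod_cast hlt)]
    simp only [List.foldl_cons]
    have hcast : ((k : Int) + 1) = ((k + 1 : Nat) : Int) := by push_cast; ring
    rw [hcast, ih (k + 1) _ (by omega) (by omega) (by omega)]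
    have hkm1 : (k : Int) - 1 = ((k - 1 : Nat) : Int) := by omega
    rw [hkm1, PySem.List.pyGetD_natCast, PySem.List.pyGetD_natCast]
    have hg1 : shapes.getD k "" = shapes[k] := List.getD_eq_getElem _ _ hlt
    have hg2 : shapes.getD (k - 1) "" = shapes[k - 1] := List.getD_eq_getElem _ _ (by omega)
    rw [hg1, hg2]
    have hd2 : shapes.drop k = shapes[k] :: shapes.drop (k + 1) := by
      rw [List.drop_eq_getElem_cons hlt]
    have hd1 : shapes.drop (k - 1) = shapes[k - 1] :: shapes.drop k := by
      have h1 : k - 1 + 1 = k := by omega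
      rw [List.drop_eq_getElem_cons (by omega : k - 1 < shapes.length), h1]
    rw [show k + 1 - 1 = k from rfl, hd1, hd2, pvDcount_cons_cons]
    rw [← hd2]
    by_cases h : shapes[k] = shapes[k - 1]
    · rw [if_pos h, if_pos h.symm]
      push_cast; ring
    · rw [if_neg h, if_neg (fun he => h he.symm)]
      push_cast; ring

-- ===== VERDICT (by name: the statement is the Claim_ definition above) =====
theorem calculate_dish_height_spec : Claim_equal_calculate_dish_height := by
  intro shapes _
  unfold Spec_calculate_dish_height calculate_dish_height calculate_dish_height_alt
  by_cases h : shapes = []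
  · simp [h]
  · rw [if_neg h, if_neg h]
    obtain ⟨x, t, rfl⟩ : ∃ x t, shapes = x :: t := by
      cases shapes with
      | nil => exact absurd rfl h
      | cons a t => exact ⟨a, t, rfl⟩
    have hlen : 1 ≤ (x :: t).length := by simp
    have := pv_fold_eq (x :: t) ((x :: t).length - 1) 1 10 rfl le_rfl hlen
    simp only [Nat.cast_one] at this
    rw [this, pvRuns_eq_dcount]
    simp
    ring
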